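-- pv_equiv track=rewrite | github.com/tyler-guetzke/CY300_FieldGoals | Project.py | score_total
-- ===== SOURCE A (Python) =====
-- def score_total(make_list):
--     player1_score = 0
--     player2_score = 0
--     for i in range(0,len(make_list),2):
--         if make_list[i] == 1:
--             player1_score += 1
--     for i in range(1,len(make_list),2):
--         if make_list[i] == 1:
--             player2_score += 1
--     return player1_score, player2_score
-- ===== SOURCE B (Python) =====
-- def score_total(make_list):
--     player1_score = 0
--     player2_score = 0
--     for i, x in enumerate(make_list):
--         if x == 1:
--             if i % 2 == 0:
--                 player1_score += 1
--             else:
--                 player2_score += 1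
--     return player1_score, player2_score
-- ===== Notes on version B (the rewrite author's own statement) =====
-- stated objective: simpler
-- what changed: Replaces A's two separate index-stepped scans (range(0,n,2) and range(1,n,2) with repeated indexing) by one enumerate pass that branches on the index's parity.
import Mathlib
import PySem

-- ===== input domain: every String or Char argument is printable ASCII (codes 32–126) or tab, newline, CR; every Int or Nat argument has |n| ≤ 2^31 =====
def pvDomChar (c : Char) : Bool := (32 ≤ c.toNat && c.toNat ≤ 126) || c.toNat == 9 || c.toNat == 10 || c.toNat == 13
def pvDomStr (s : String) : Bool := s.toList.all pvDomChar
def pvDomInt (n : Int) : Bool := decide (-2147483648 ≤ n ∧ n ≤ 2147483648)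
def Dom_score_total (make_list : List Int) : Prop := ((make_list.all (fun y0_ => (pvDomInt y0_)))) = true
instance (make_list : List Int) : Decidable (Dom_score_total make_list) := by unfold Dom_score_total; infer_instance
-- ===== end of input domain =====

-- B fuses A's two index-stepped scans (range(0,n,2) and range(1,n,2)) into a single
-- enumerate pass with a parity branch on the index; same results, simpler single traversal.


-- ===== PORT A =====
def score_total (make_list : List Int) : Int × Int :=
  let player1_score : Int :=
    (PySem.List.pyRange 0 (make_list.length : Int) 2).foldl
      (fun acc i => if PySem.List.pyGet? make_list i = some 1 then acc + 1 else acc) 0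
  let player2_score : Int :=
    (PySem.List.pyRange 1 (make_list.length : Int) 2).foldl
      (fun acc i => if PySem.List.pyGet? make_list i = some 1 then acc + 1 else acc) 0
  (player1_score, player2_score)

-- ===== PORT B =====
def score_total_alt (make_list : List Int) : Int × Int :=
  (PySem.List.enumerate make_list 0).foldl
    (fun (st : Int × Int) (p : Int × Int) =>
      if p.2 = 1 then
        (if PySem.Int.mod p.1 2 = 0 then (st.1 + 1, st.2) else (st.1, st.2 + 1))
      else st) (0, 0)

-- ===== PRECONDITION & SPEC =====
def Spec_score_total (make_list : List Int) (out : Int × Int) : Prop := out = score_total_alt make_list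
instance (make_list : List Int) (out : Int × Int) : Decidable (Spec_score_total make_list out) := by unfold Spec_score_total; infer_instance

-- ===== CLAIM (what is proved, stated in full; the proofs are below) =====
def Claim_equal_score_total : Prop := ∀ (make_list : List Int), Dom_score_total make_list → Spec_score_total make_list (score_total make_list)

-- ===== LEMMAS AND PROOFS =====

-- (e, o): e counts the 1s at even positions, o the 1s at odd positions.
def pvCnt : List Int → Int × Int
  | [] => (0, 0)
  | a :: t => ((if a = 1 then 1 else 0) + (pvCnt t).2, (pvCnt t).1)

lemma range2_odd (m : Nat) :
    PySem.List.pyRange 1 ((m : Int) + 1) 2 = (PySem.List.pyRange 0 (m : Int) 2).map (· + 1) := by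
  rw [PySem.List.pyRange_of_pos _ _ (by norm_num), PySem.List.pyRange_of_pos _ _ (by norm_num),
    List.map_map]
  have hc : (if (1:Int) < (m : Int) + 1 then (((m : Int) + 1 - 1 + 2 - 1) / 2).toNat else 0)
      = (if (0:Int) < (m : Int) then (((m : Int) - 0 + 2 - 1) / 2).toNat else 0) := by
    split_ifs <;> omega
  rw [hc]
  apply List.map_congr_left
  intro k _
  simp; omega

lemma range2_even (m : Nat) :
    PySem.List.pyRange 0 ((m : Int) + 1) 2 = 0 :: (PySem.List.pyRange 1 (m : Int) 2).map (· + 1) := by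
  rw [PySem.List.pyRange_of_pos _ _ (by norm_num), PySem.List.pyRange_of_pos _ _ (by norm_num),
    List.map_map]
  have hc : (if (0:Int) < (m : Int) + 1 then (((m : Int) + 1 - 0 + 2 - 1) / 2).toNat else 0)
      = (if (1:Int) < (m : Int) then (((m : Int) - 1 + 2 - 1) / 2).toNat else 0) + 1 := by
    split_ifs <;> omega
  rw [hc, List.range_succ_eq_map, List.map_cons, List.map_map]
  refine congrArg₂ _ (by norm_num) ?_
  apply List.map_congr_left
  intro k _
  simp; omega

lemma fold_shift (a : Int) (t : List Int) (r : List Int) (hr : ∀ x ∈ r, 0 ≤ x) (init : Int) :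
    (r.map (· + 1)).foldl
        (fun acc i => if PySem.List.pyGet? (a :: t) i = some 1 then acc + 1 else acc) init
      = r.foldl (fun acc i => if PySem.List.pyGet? t i = some 1 then acc + 1 else acc) init := by
  rw [List.foldl_map]
  apply PySem.List.foldl_congr_mem
  intro acc x hx
  obtain ⟨k, rfl⟩ : ∃ k : Nat, x = (k : Int) := ⟨x.toNat, (Int.toNat_of_nonneg (hr x hx)).symm⟩
  rw [PySem.List.pyGet?_cons_succ]

lemma foldA_init (l : List Int) (r : List Int) (init : Int) :
    r.foldl (fun acc i => if PySem.List.pyGet? l i = some 1 then acc + 1 else acc) init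
      = init + r.foldl (fun acc i => if PySem.List.pyGet? l i = some 1 then acc + 1 else acc) 0 := by
  induction r generalizing init with
  | nil => simp
  | cons x r ih =>
    simp only [List.foldl_cons]
    rw [ih, ih (init := if PySem.List.pyGet? l x = some 1 then 0 + 1 else 0)]
    split_ifs <;> omega

lemma pyRange2_nonneg (a b : Int) (ha : 0 ≤ a) : ∀ x ∈ PySem.List.pyRange a b 2, 0 ≤ x := by
  intro x hx
  have := (PySem.List.mem_pyRange_iff_of_pos (by norm_num) x).mp hx
  omega

lemma A_eq (l : List Int) : score_total l = pvCnt l := by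
  induction l with
  | nil => simp [score_total, pvCnt, PySem.List.pyRange]
  | cons a t ih =>
    have hlen : ((a :: t).length : Int) = (t.length : Int) + 1 := by push_cast [List.length_cons]; ring
    have he := range2_even t.length
    have ho := range2_odd t.length
    simp only [score_total, hlen, he, ho, List.foldl_cons] at *
    rw [fold_shift a t _ (pyRange2_nonneg 0 _ le_rfl),
        fold_shift a t _ (pyRange2_nonneg 1 _ (by norm_num)),
        PySem.List.pyGet?_zero_cons,
        foldA_init]
    simp only [pvCnt, ← ih, Option.some.injEq]
    split_ifs <;> norm_num

lemma B_go (l : List Int) (s : Int) (hs : 0 ≤ s) (p q : Int) :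
    (PySem.List.enumerate l s).foldl
        (fun (st : Int × Int) (pr : Int × Int) =>
          if pr.2 = 1 then
            (if PySem.Int.mod pr.1 2 = 0 then (st.1 + 1, st.2) else (st.1, st.2 + 1))
          else st) (p, q)
      = if s % 2 = 0 then (p + (pvCnt l).1, q + (pvCnt l).2)
        else (p + (pvCnt l).2, q + (pvCnt l).1) := by
  induction l generalizing s p q with
  | nil =>
    simp only [PySem.List.enumerate, List.foldl_nil, pvCnt]
    split_ifs <;> simp
  | cons a t ih =>
    rw [PySem.List.enumerate_cons, List.foldl_cons]
    have hmod : PySem.Int.mod s 2 = s % 2 := PySem.Int.mod_eq_emod_of_pos (by norm_num)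
    by_cases h1 : a = 1 <;> by_cases h2 : s % 2 = 0 <;>
      · simp only [h1, hmod, h2]
        rw [ih (s + 1) (by omega)]
        simp only [pvCnt]
        split_ifs with h3 <;> simp_all [Prod.ext_iff] <;> omega

lemma B_eq (l : List Int) : score_total_alt l = pvCnt l := by
  have := B_go l 0 le_rfl 0 0
  simp only [score_total_alt]
  rw [this]
  norm_num

-- ===== VERDICT (by name: the statement is the Claim_ definition above) =====
theorem score_total_spec : Claim_equal_score_total := by
  intro l _
  unfold Spec_score_total
  rw [A_eq, B_eq]
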